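-- pv_equiv track=rewrite | github.com/jdhuntington/advent2024 | day04/problem1.py | rotate_315
-- ===== SOURCE A (Python) =====
-- def rotate_315(lines):
--     if len(lines) == 0:
--         return []
--
--     line_length = len(lines[0])
--     result = [[' '] * line_length for _ in range(line_length + len(lines) - 1)]
--
--     for col_index in range(line_length):
--         for row_index in range(len(lines)):
--             result[row_index + (line_length - 1 - col_index)][col_index] = lines[row_index][col_index]
--
--     return [''.join(chars) for chars in result]
-- ===== SOURCE B (Python) =====
-- def rotate_315(lines):
--     if len(lines) == 0:
--         return []
--     line_length = len(lines[0])
--     n = len(lines)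
--     return [''.join(lines[r - (line_length - 1 - c)][c]
--                     if 0 <= r - (line_length - 1 - c) < n else ' '
--                     for c in range(line_length))
--             for r in range(line_length + n - 1)]
-- ===== Notes on version B (the rewrite author's own statement) =====
-- stated objective: simpler
-- what changed: Replaces A's scatter (allocate a space-filled mutable grid, write each input char at its shifted position) with a direct gather: each output row is assembled by ''.join, reading lines[r-(L-1-c)][c] or ' ' per column, with no mutable intermediate grid.
import Mathlib
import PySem

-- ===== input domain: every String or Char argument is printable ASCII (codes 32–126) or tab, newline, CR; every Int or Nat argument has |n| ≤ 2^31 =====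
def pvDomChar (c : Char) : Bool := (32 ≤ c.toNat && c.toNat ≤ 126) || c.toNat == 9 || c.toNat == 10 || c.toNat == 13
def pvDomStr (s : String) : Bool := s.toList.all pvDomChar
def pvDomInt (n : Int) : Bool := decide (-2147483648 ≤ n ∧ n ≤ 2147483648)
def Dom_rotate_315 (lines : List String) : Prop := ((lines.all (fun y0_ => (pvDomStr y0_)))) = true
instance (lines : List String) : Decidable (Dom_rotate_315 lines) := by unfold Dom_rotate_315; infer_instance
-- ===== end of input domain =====

-- B changes the decomposition only: a gather with no mutable grid instead of A's scatter into one; same cost.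

-- ===== PORT A =====
-- scatter: allocate a space-filled grid, then for each column and row write the char at its shifted position
def rotate_315 (lines : List String) : List String :=
  if lines.length = 0 then []
  else
    let L := (lines.getD 0 "").toList.length
    let result0 := List.replicate (L + lines.length - 1) (List.replicate L ' ')
    let result := (List.range L).foldl (fun res c =>
      (List.range lines.length).foldl (fun res r =>
        -- result[r + (L-1-c)][c] = lines[r][c]; the char access is totalized with a default,
        -- Pre_rotate_315 excludes exactly the ragged inputs where Python raises IndexError
        res.modify (r + (L - 1 - c)) (fun row => row.set c ((lines.getD r "").toList.getD c ' '))) res) result0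
    result.map (fun chars => String.ofList chars)

-- ===== PORT B =====
-- gather: build each output row directly, reading lines[r-(L-1-c)][c] or ' '
def rotate_315_alt (lines : List String) : List String :=
  if lines.length = 0 then []
  else
    let L := (lines.getD 0 "").toList.length
    let n := lines.length
    (List.range (L + n - 1)).map (fun (r : Nat) =>
      String.ofList ((List.range L).map (fun (c : Nat) =>
        let k : Int := (r : Int) - ((L - 1 - c : Nat) : Int)
        if 0 ≤ k ∧ k < (n : Int) then (lines.getD k.toNat "").toList.getD c ' ' else ' ')))

-- ===== PRECONDITION & SPEC =====
-- Pre_ excludes exactly the ragged inputs (a line shorter than the first) on which Python A raises IndexError.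
def Pre_rotate_315 (lines : List String) : Prop :=
  ∀ s ∈ lines, (lines.getD 0 "").toList.length ≤ s.toList.length
instance (lines : List String) : Decidable (Pre_rotate_315 lines) := by unfold Pre_rotate_315; infer_instance
def pvWitness_rotate_315 : List String := (["ab", "cd", "ef"])
def Spec_rotate_315 (lines : List String) (out : List String) : Prop := out = rotate_315_alt lines
instance (lines : List String) (out : List String) : Decidable (Spec_rotate_315 lines out) := by unfold Spec_rotate_315; infer_instance

-- ===== CLAIM (what is proved, stated in full; the proofs are below) =====
def Claim_equal_rotate_315 : Prop := ∀ (lines : List String), Dom_rotate_315 lines → Pre_rotate_315 lines → Spec_rotate_315 lines (rotate_315 lines)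

-- ===== LEMMAS AND PROOFS =====

-- the inner row loop, pointwise on grid rows
theorem pv_inner_getElem? (s : Nat) (v' : Nat → Char) (c : Nat) (m : Nat)
    (g : List (List Char)) (i : Nat) :
    ((List.range m).foldl (fun res r => res.modify (r + s) (fun row => row.set c (v' r))) g)[i]? =
      if s ≤ i ∧ i < m + s then (g[i]?).map (fun row => row.set c (v' (i - s))) else g[i]? := by
  induction m generalizing i with
  | zero => simp
  | succ m ih =>
    rw [List.range_succ, List.foldl_append]
    simp only [List.foldl_cons, List.foldl_nil]
    rw [List.getElem?_modify]
    by_cases hi : i = m + s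
    · subst hi
      rw [ih]
      have h1 : ¬ (s ≤ m + s ∧ m + s < m + s) := by omega
      rw [if_neg h1, if_pos (by omega : s ≤ m + s ∧ m + s < m + 1 + s)]
      simp
    · rw [ih]
      have h2 : ¬ (m + s = i) := by omega
      by_cases hb : s ≤ i ∧ i < m + s
      · rw [if_pos hb, if_pos (by omega : s ≤ i ∧ i < m + 1 + s)]
        cases g[i]? <;> simp [h2]
      · rw [if_neg hb, if_neg (by omega : ¬ (s ≤ i ∧ i < m + 1 + s))]
        cases g[i]? <;> simp [h2]

-- the outer column loop, pointwise on grid rows, turned into a per-row fold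
theorem pv_outer_getElem? (n L : Nat) (v : Nat → Nat → Char) (cs : List Nat)
    (g : List (List Char)) (i : Nat) :
    (cs.foldl (fun res c =>
        (List.range n).foldl (fun res r => res.modify (r + (L - 1 - c)) (fun row => row.set c (v r c))) res) g)[i]? =
      (g[i]?).map (fun row => cs.foldl (fun row c =>
        if L - 1 - c ≤ i ∧ i < n + (L - 1 - c) then row.set c (v (i - (L - 1 - c)) c) else row) row) := by
  induction cs generalizing g with
  | nil => simp
  | cons c cs ih =>
    simp only [List.foldl_cons]
    rw [ih, pv_inner_getElem? (L - 1 - c) (fun r => v r c) c n g i]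
    by_cases h : L - 1 - c ≤ i ∧ i < n + (L - 1 - c)
    · rw [if_pos h]
      cases g[i]? with
      | none => rfl
      | some a =>
        simp only [Option.map_some]
        rw [if_pos h]
    · rw [if_neg h]
      cases g[i]? with
      | none => rfl
      | some a =>
        simp only [Option.map_some]
        rw [if_neg h]

-- the per-row fold of conditional sets, pointwise
theorem pv_row_getElem? (P : Nat → Prop) [DecidablePred P] (w : Nat → Char)
    (cs : List Nat) (row : List Char) (j : Nat) :
    (cs.foldl (fun row c => if P c then row.set c (w c) else row) row)[j]? =
      if j ∈ cs ∧ P j ∧ j < row.length then some (w j) else row[j]? := by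
  induction cs generalizing row with
  | nil => simp
  | cons c cs ih =>
    simp only [List.foldl_cons]
    rw [ih]
    have hlen : (if P c then row.set c (w c) else row).length = row.length := by
      split <;> simp
    rw [hlen]
    rcases Decidable.em (P c) with hPc | hPc
    · rw [if_pos hPc, List.getElem?_set]
      by_cases h1 : j ∈ cs ∧ P j ∧ j < row.length
      · rw [if_pos h1, if_pos ⟨List.mem_cons_of_mem _ h1.1, h1.2⟩]
      · rw [if_neg h1]
        by_cases hjc : c = j
        · subst hjc
          by_cases hjl : c < row.length
          · rw [if_pos (show c ∈ c :: cs ∧ P c ∧ c < row.length from ⟨by simp, hPc, hjl⟩)]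
            simp [hjl]
          · rw [if_neg (show ¬ (c ∈ c :: cs ∧ P c ∧ c < row.length) from fun hh => hjl hh.2.2)]
            rw [List.getElem?_eq_none (by omega)]
            simp [hjl]
        · rw [if_neg hjc]
          rw [if_neg (by
            rintro ⟨hm, hPj, hjl⟩
            rcases List.mem_cons.mp hm with h | h
            · exact hjc h.symm
            · exact h1 ⟨h, hPj, hjl⟩)]
    · rw [if_neg hPc]
      by_cases h1 : j ∈ cs ∧ P j ∧ j < row.length
      · rw [if_pos h1, if_pos ⟨List.mem_cons_of_mem _ h1.1, h1.2⟩]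
      · rw [if_neg h1]
        rw [if_neg (by
          rintro ⟨hm, hPj, hjl⟩
          rcases List.mem_cons.mp hm with h | h
          · exact hPc (h ▸ hPj)
          · exact h1 ⟨h, hPj, hjl⟩)]

-- the two grids agree
theorem pv_grid_eq (lines : List String) :
    ((List.range ((lines.getD 0 "").toList.length)).foldl (fun res c =>
        (List.range lines.length).foldl (fun res r =>
          res.modify (r + ((lines.getD 0 "").toList.length - 1 - c))
            (fun row => row.set c ((lines.getD r "").toList.getD c ' '))) res)
      (List.replicate ((lines.getD 0 "").toList.length + lines.length - 1)
        (List.replicate ((lines.getD 0 "").toList.length) ' '))) =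
    (List.range ((lines.getD 0 "").toList.length + lines.length - 1)).map (fun (r : Nat) =>
      (List.range ((lines.getD 0 "").toList.length)).map (fun (c : Nat) =>
        let k : Int := (r : Int) - (((lines.getD 0 "").toList.length - 1 - c : Nat) : Int)
        if 0 ≤ k ∧ k < (lines.length : Int) then (lines.getD k.toNat "").toList.getD c ' ' else ' ')) := by
  set L := (lines.getD 0 "").toList.length with hL
  set n := lines.length with hn
  apply List.ext_getElem?
  intro i
  rw [pv_outer_getElem? n L (fun r c => (lines.getD r "").toList.getD c ' ') (List.range L)]
  rw [List.getElem?_map, List.getElem?_replicate]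
  by_cases hi : i < L + n - 1
  · rw [if_pos hi, List.getElem?_range hi]
    simp only [Option.map_some]
    congr 1
    apply List.ext_getElem?
    intro j
    rw [pv_row_getElem? (fun c => L - 1 - c ≤ i ∧ i < n + (L - 1 - c))
      (fun c => (lines.getD (i - (L - 1 - c)) "").toList.getD c ' ') (List.range L)
      (List.replicate L ' ') j]
    rw [List.length_replicate, List.getElem?_map]
    by_cases hj : j < L
    · rw [List.getElem?_range hj, List.getElem?_replicate, if_pos hj]
      simp only [Option.map_some]
      by_cases hb : L - 1 - j ≤ i ∧ i < n + (L - 1 - j)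
      · rw [if_pos (show j ∈ List.range L ∧ (L - 1 - j ≤ i ∧ i < n + (L - 1 - j)) ∧ j < L from
          ⟨List.mem_range.mpr hj, hb, hj⟩)]
        have hc1 : 0 ≤ (i : Int) - ((L - 1 - j : Nat) : Int) := by omega
        have hc2 : (i : Int) - ((L - 1 - j : Nat) : Int) < (n : Int) := by omega
        have htn : ((i : Int) - ((L - 1 - j : Nat) : Int)).toNat = i - (L - 1 - j) := by omega
        simp [hc2, htn]
        intro hx
        exact absurd hx (by omega)
      · rw [if_neg (show ¬ (j ∈ List.range L ∧ (L - 1 - j ≤ i ∧ i < n + (L - 1 - j)) ∧ j < L) from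
          fun hh => hb hh.2.1)]
        have hcond : ¬ (0 ≤ (i : Int) - ((L - 1 - j : Nat) : Int) ∧ (i : Int) - ((L - 1 - j : Nat) : Int) < (n : Int)) := by
          omega
        simp
        intro h1 h2
        exact absurd ⟨by omega, by omega⟩ hb
    · rw [if_neg (show ¬ (j ∈ List.range L ∧ (L - 1 - j ≤ i ∧ i < n + (L - 1 - j)) ∧ j < L) from
        fun hh => hj hh.2.2)]
      rw [List.getElem?_eq_none (show (List.range L).length ≤ j by simp; omega),
        List.getElem?_replicate, if_neg hj]
      rfl
  · rw [if_neg hi, List.getElem?_eq_none (show (List.range (L + n - 1)).length ≤ i by simp; omega)]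
    rfl

-- ===== VERDICT (by name: the statement is the Claim_ definition above) =====
theorem rotate_315_spec : Claim_equal_rotate_315 := by
  intro lines _ _
  unfold Spec_rotate_315 rotate_315 rotate_315_alt
  by_cases h : lines.length = 0
  · rw [if_pos h, if_pos h]
  · rw [if_neg h, if_neg h]
    show (_ : List (List Char)).map _ = _
    rw [pv_grid_eq lines, List.map_map]
    rfl
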